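-- pv_equiv track=rewrite | github.com/ehlee89/PRML_project | model_3D.py | count_dShape
-- ===== SOURCE A (Python) =====
-- def find_str(list_str):
--     if "AAD" in list_str:
--         return 0
--     elif "PNC" in list_str:
--         return 2
--     elif "ANC" in list_str:
--         return 1
--     elif "PPD" in list_str:
--         return 3
--
-- def count_dShape(data_name,lists):
--
--     test_dSize = 0
--     train_dSize = 0
--     t_num = 0
--     ADFlag = True
--     NCFlag = True
--     PNCFlag = True
--     PPDFlag = True
--
--     for dname, list in zip(data_name,lists):
--         diseaseNum = find_str(dname)
--
--         if diseaseNum == 0: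
--             if ADFlag:
--                 test_dSize += list[0]
--                 ADFlag = False
--             else:
--                 train_dSize += list[0]
--
--         elif diseaseNum == 1:
--             if NCFlag:
--                 test_dSize += list[0]
--                 NCFlag = False
--             else:
--                 train_dSize += list[0]
--         elif diseaseNum == 2:
--             if PNCFlag:
--                 test_dSize += list[0]
--                 PNCFlag = False
--             else:
--                 train_dSize += list[0]
--
--         elif diseaseNum == 3:
--             if PPDFlag:
--                 test_dSize += list[0]
--                 PPDFlag = False
--             else:
--                 train_dSize += list[0]
--
--     return test_dSize, train_dSize
-- ===== SOURCE B (Python) =====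
-- def find_str(list_str):
--     if "AAD" in list_str:
--         return 0
--     elif "PNC" in list_str:
--         return 2
--     elif "ANC" in list_str:
--         return 1
--     elif "PPD" in list_str:
--         return 3
--
-- def count_dShape(data_name, lists):
--     # Stage 1: project the input to (category, first-element) pairs for matched names.
--     pairs = [(find_str(d), l[0]) for d, l in zip(data_name, lists)
--              if find_str(d) is not None]
--     # Stage 2: test = first occurrence's value for each of the four categories;
--     # train = everything else, obtained by subtraction from the grand total.
--     total = sum(v for _, v in pairs)
--     test = 0
--     for cat in (0, 1, 2, 3):
--         test += next((v for c, v in pairs if c == cat), 0)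
--     return test, total - test
-- ===== Notes on version B (the rewrite author's own statement) =====
-- stated objective: alternative
-- what changed: Replaces A's single stateful pass with four boolean flags by a staged computation: project the input to (category, first-element) pairs, take the grand total, add the first occurrence per category into test, and obtain train by subtraction (total - test).
import Mathlib
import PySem

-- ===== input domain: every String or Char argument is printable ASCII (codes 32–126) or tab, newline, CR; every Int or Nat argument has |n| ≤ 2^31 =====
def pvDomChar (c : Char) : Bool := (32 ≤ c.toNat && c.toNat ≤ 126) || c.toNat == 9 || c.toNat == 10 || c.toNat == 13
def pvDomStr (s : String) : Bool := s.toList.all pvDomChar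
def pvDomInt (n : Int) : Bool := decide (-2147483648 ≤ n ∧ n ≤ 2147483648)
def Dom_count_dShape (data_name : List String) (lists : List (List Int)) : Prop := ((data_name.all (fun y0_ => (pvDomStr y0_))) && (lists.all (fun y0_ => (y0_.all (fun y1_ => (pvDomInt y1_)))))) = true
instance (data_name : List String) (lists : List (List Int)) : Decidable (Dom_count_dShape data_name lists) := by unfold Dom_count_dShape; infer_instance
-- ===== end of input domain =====

-- B replaces A's single stateful flag-driven pass by a staged computation: project to
-- (category, first-element) pairs, sum the total, add the first occurrence per category
-- into test, and get train by subtraction (objective: alternative).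

-- ===== PORT A =====
-- find_str: returns Option Int (none = Python's implicit None)
def findStr (s : String) : Option Int :=
  if PySem.Str.isIn "AAD" s then some 0
  else if PySem.Str.isIn "PNC" s then some 2
  else if PySem.Str.isIn "ANC" s then some 1
  else if PySem.Str.isIn "PPD" s then some 3
  else none

-- one iteration of A's loop; state = (test_dSize, train_dSize, ADFlag, NCFlag, PNCFlag, PPDFlag)
-- list[0] is PySem.List.pyGetD l 0 0; Pre_ guarantees l ≠ [], where this is exact
def stepA (st : Int × Int × Bool × Bool × Bool × Bool) (p : String × List Int) :
    Int × Int × Bool × Bool × Bool × Bool :=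
  match st, p with
  | (test, train, ad, nc, pnc, ppd), (dname, l) =>
    let d := findStr dname
    if d = some 0 then
      if ad then (test + PySem.List.pyGetD l 0 0, train, false, nc, pnc, ppd)
      else (test, train + PySem.List.pyGetD l 0 0, ad, nc, pnc, ppd)
    else if d = some 1 then
      if nc then (test + PySem.List.pyGetD l 0 0, train, ad, false, pnc, ppd)
      else (test, train + PySem.List.pyGetD l 0 0, ad, nc, pnc, ppd)
    else if d = some 2 then
      if pnc then (test + PySem.List.pyGetD l 0 0, train, ad, nc, false, ppd)
      else (test, train + PySem.List.pyGetD l 0 0, ad, nc, pnc, ppd)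
    else if d = some 3 then
      if ppd then (test + PySem.List.pyGetD l 0 0, train, ad, nc, pnc, false)
      else (test, train + PySem.List.pyGetD l 0 0, ad, nc, pnc, ppd)
    else (test, train, ad, nc, pnc, ppd)

def count_dShape (data_name : List String) (lists : List (List Int)) : Int × Int :=
  let r := (data_name.zip lists).foldl stepA (0, 0, true, true, true, true)
  (r.1, r.2.1)

-- ===== PORT B =====
-- stage 1: the (category, first-element) pairs of the matched names
def bPairs (ps : List (String × List Int)) : List (Int × Int) :=
  ps.filterMap (fun p => (findStr p.1).map (fun c => (c, PySem.List.pyGetD p.2 0 0)))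

-- next((v for c, v in pairs if c == cat), 0): first occurrence's value, default 0
def firstVal (pairs : List (Int × Int)) (cat : Int) : Int :=
  match pairs.find? (fun q => q.1 == cat) with
  | some q => q.2
  | none => 0

def count_dShape_alt (data_name : List String) (lists : List (List Int)) : Int × Int :=
  let pairs := bPairs (data_name.zip lists)
  let total := (pairs.map Prod.snd).sum
  let test := [(0 : Int), 1, 2, 3].foldl (fun acc cat => acc + firstVal pairs cat) 0
  (test, total - test)

-- ===== PRECONDITION & SPEC =====
-- Pre_ excludes exactly the inputs where Python's list[0] raises IndexError: a pair whose
-- name matches one of the four categories but whose list is empty.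
def Pre_count_dShape (data_name : List String) (lists : List (List Int)) : Prop :=
  ∀ p ∈ data_name.zip lists,
    (PySem.Str.isIn "AAD" p.1 || PySem.Str.isIn "PNC" p.1 ||
     PySem.Str.isIn "ANC" p.1 || PySem.Str.isIn "PPD" p.1) = true → p.2 ≠ []
instance (data_name : List String) (lists : List (List Int)) : Decidable (Pre_count_dShape data_name lists) := by unfold Pre_count_dShape; infer_instance

def pvWitness_count_dShape : List String × List (List Int) :=
  (["AAD_1", "xANCx", "PNC", "none"], [[5], [2], [3], []])

def Spec_count_dShape (data_name : List String) (lists : List (List Int)) (out : Int × Int) : Prop := out = count_dShape_alt data_name lists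
instance (data_name : List String) (lists : List (List Int)) (out : Int × Int) : Decidable (Spec_count_dShape data_name lists out) := by unfold Spec_count_dShape; infer_instance

-- ===== CLAIM (what is proved, stated in full; the proofs are below) =====
def Claim_equal_count_dShape : Prop := ∀ (data_name : List String) (lists : List (List Int)), Dom_count_dShape data_name lists → Pre_count_dShape data_name lists → Spec_count_dShape data_name lists (count_dShape data_name lists)

-- ===== LEMMAS AND PROOFS =====

lemma firstVal_cons (d v : Int) (rest : List (Int × Int)) (c : Int) :
    firstVal ((d, v) :: rest) c = if d = c then v else firstVal rest c := by
  by_cases h : d = c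
  · simp [firstVal, h]
  · have hb : ((d, v).1 == c) = false := by simp [h]
    simp only [firstVal, List.find?_cons, hb]
    simp [h]

-- the per-flag contribution to test: a still-true flag means the category's first
-- occurrence ahead still goes to test
def flagT (pairs : List (Int × Int)) (ad nc pnc ppd : Bool) : Int :=
  (if ad then firstVal pairs 0 else 0) + (if nc then firstVal pairs 1 else 0) +
  (if pnc then firstVal pairs 2 else 0) + (if ppd then firstVal pairs 3 else 0)

-- characterisation of A's loop: starting from (test, train, flags) it ends at
-- (test + flagT, train + (total - flagT)) over the projected pairs
lemma loop_char (ps : List (String × List Int)) (test train : Int)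
    (ad nc pnc ppd : Bool) :
    ((ps.foldl stepA (test, train, ad, nc, pnc, ppd)).1,
     (ps.foldl stepA (test, train, ad, nc, pnc, ppd)).2.1) =
    (test + flagT (bPairs ps) ad nc pnc ppd,
     train + (((bPairs ps).map Prod.snd).sum - flagT (bPairs ps) ad nc pnc ppd)) := by
  induction ps generalizing test train ad nc pnc ppd with
  | nil => simp [bPairs, flagT, firstVal]
  | cons p t ih =>
    obtain ⟨dname, l⟩ := p
    have hpairs : bPairs ((dname, l) :: t) =
        match findStr dname with
        | none => bPairs t
        | some d => (d, PySem.List.pyGetD l 0 0) :: bPairs t := by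
      cases hd : findStr dname <;> simp [bPairs, hd]
    simp only [List.foldl_cons, stepA]
    rcases hd : findStr dname with _ | d
    · simp only [hd, hpairs]
      simpa using ih test train ad nc pnc ppd
    · have hmem : d = 0 ∨ d = 1 ∨ d = 2 ∨ d = 3 := by
        unfold findStr at hd; split_ifs at hd <;> simp_all
      simp only [hd, hpairs]
      set v := PySem.List.pyGetD l 0 0 with hv
      rcases hmem with rfl | rfl | rfl | rfl
      · cases ad with
        | true =>
          simp only [reduceIte]
          rw [ih, Prod.mk.injEq]
          constructor <;> (simp [flagT, firstVal_cons]; try ring)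
        | false =>
          simp only [Option.some.injEq, reduceIte]
          rw [ih, Prod.mk.injEq]
          constructor <;> (simp [flagT, firstVal_cons]; try ring)
      · cases nc with
        | true =>
          simp only [Option.some.injEq, reduceIte]
          rw [ih, Prod.mk.injEq]
          constructor <;> (simp [flagT, firstVal_cons]; try ring)
        | false =>
          simp only [Option.some.injEq, reduceIte]
          rw [ih, Prod.mk.injEq]
          constructor <;> (simp [flagT, firstVal_cons]; try ring)
      · cases pnc with
        | true =>
          simp only [Option.some.injEq, reduceIte]
          rw [ih, Prod.mk.injEq]
          constructor <;> (simp [flagT, firstVal_cons]; try ring)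
        | false =>
          simp only [Option.some.injEq, reduceIte]
          rw [ih, Prod.mk.injEq]
          constructor <;> (simp [flagT, firstVal_cons]; try ring)
      · cases ppd with
        | true =>
          simp only [Option.some.injEq, reduceIte]
          rw [ih, Prod.mk.injEq]
          constructor <;> (simp [flagT, firstVal_cons]; try ring)
        | false =>
          simp only [Option.some.injEq, reduceIte]
          rw [ih, Prod.mk.injEq]
          constructor <;> (simp [flagT, firstVal_cons]; try ring)

-- ===== VERDICT (by name: the statement is the Claim_ definition above) =====
theorem count_dShape_spec : Claim_equal_count_dShape := by
  intro data_name lists _ _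
  unfold Spec_count_dShape count_dShape count_dShape_alt
  refine (loop_char (data_name.zip lists) 0 0 true true true true).trans ?_
  simp [flagT, firstVal, List.foldl]
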